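-- pv_equiv track=rewrite | github.com/Nauhai/aoc-2023 | day-13/src/part2.py | process
-- ===== SOURCE A (Python) =====
-- def process(patterns):
--     summary = 0
--     for pattern in patterns:
--         if (line := find_vertical_reflection_line(pattern)) is not None:
--             summary += line+1
--         else:
--             summary += 100*(find_horizontal_reflection_line(pattern)+1)
--     return summary
--
-- def find_vertical_reflection_line(pattern):
--     for j in range(len(pattern[0])-1):
--         if vertical_diff(pattern, j) == 1:
--             return j
--
-- def find_horizontal_reflection_line(pattern):
--     for i in range(len(pattern)-1):
--         if horizontal_diff(pattern, i) == 1: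
--             return i
--
-- def vertical_diff(pattern, j):
--     diff = 0
--     d = 0
--     while 0 <= j-d and j+1+d < len(pattern[0]):
--         for i in range(len(pattern)):
--             if pattern[i][j-d] != pattern[i][j+1+d]:
--                 diff += 1
--         d += 1
--     return diff
--
-- def horizontal_diff(pattern, i):
--     diff = 0
--     d = 0
--     while 0 <= i-d and i+1+d < len(pattern):
--         for j in range(len(pattern[i])):
--             if pattern[i-d][j] != pattern[i+1+d][j]:
--                 diff += 1
--         d += 1
--     return diff
-- ===== SOURCE B (Python) =====
-- def process(patterns):
--     total = 0
--     for pattern in patterns: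
--         w = len(pattern[0])
--         diags = [a + b
--                  for row in pattern
--                  for a in range(w)
--                  for b in range(a + 1, w)
--                  if row[a] != row[b]]
--         counts = {}
--         for s in diags:
--             counts[s] = counts.get(s, 0) + 1
--         v = next((j for j in range(w - 1) if counts.get(2 * j + 1, 0) == 1), None)
--         if v is not None:
--             total += v + 1
--         else:
--             n = len(pattern)
--             diags = [p + q
--                      for p in range(n)
--                      for q in range(p + 1, n)
--                      for x, y in zip(pattern[p], pattern[q])
--                      if x != y]
--             counts = {}
--             for s in diags:
--                 counts[s] = counts.get(s, 0) + 1
--             h = next(i for i in range(n - 1) if counts.get(2 * i + 1, 0) == 1)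
--             total += 100 * (h + 1)
--     return total
-- ===== Notes on version B (the rewrite author's own statement) =====
-- stated objective: alternative
-- what changed: Instead of expanding outward from each candidate reflection line and re-scanning the grid (A's vertical_diff/horizontal_diff while-loops), B makes one pass over all unordered column pairs within each row (and all row pairs), bucketing every mismatching cell pair into a dict counter keyed by its index sum; a line j is a one-smudge mirror exactly when the counter at key 2j+1 is 1, so each candidate becomes a single lookup.
-- outside the precondition, e.g. on process([['abxx', 'aa']]): A returns 1, B raises IndexError; on process([['ab', 'ac', 'abc']]): A returns 100, B returns 100
import Mathlib
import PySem

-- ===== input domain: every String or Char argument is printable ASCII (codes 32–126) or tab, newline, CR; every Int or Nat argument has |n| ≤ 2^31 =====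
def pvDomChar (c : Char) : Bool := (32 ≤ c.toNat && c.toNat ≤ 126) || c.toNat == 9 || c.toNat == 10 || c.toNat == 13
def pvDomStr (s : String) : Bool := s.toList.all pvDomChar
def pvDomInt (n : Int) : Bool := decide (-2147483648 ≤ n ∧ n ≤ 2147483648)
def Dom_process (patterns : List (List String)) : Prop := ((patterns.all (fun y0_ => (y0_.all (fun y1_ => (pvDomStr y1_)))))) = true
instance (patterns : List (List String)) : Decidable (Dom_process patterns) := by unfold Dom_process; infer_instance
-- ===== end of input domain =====

-- B replaces A's per-candidate-line outward expansion by a one-shot bucketing of every mismatching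
-- cell pair into a counter keyed by its anti-diagonal index sum; a candidate line is then a single
-- counter lookup (alternative algorithm of similar cost; equivalence on the stated Pre_).

-- ===== PORT A =====
-- len(pattern[0]); on an empty pattern Python raises IndexError (excluded by Pre_), port uses "".
def specW (pattern : List String) : Nat := (pattern.headD "").toList.length

-- the 'while 0 <= j-d and j+1+d < lim: body; d += 1' loop, fuel-bounded; step d diff is the body.
def aWhile (step : Nat → Int → Int) (lim j : Nat) : Nat → Nat → Int → Int
  | 0, _, diff => diff
  | fuel + 1, d, diff =>
    if d ≤ j ∧ j + 1 + d < lim then aWhile step lim j fuel (d + 1) (step d diff) else diff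

-- vertical_diff; out-of-range char access defaults to ' ' where Python raises (outside Pre_).
def aVDiff (pattern : List String) (j : Nat) : Int :=
  aWhile (fun d diff =>
      pattern.foldl (fun diff row =>
        if row.toList.getD (j - d) ' ' ≠ row.toList.getD (j + 1 + d) ' ' then diff + 1 else diff)
        diff)
    (specW pattern) j (specW pattern) 0 0

-- horizontal_diff; the inner range bound is len(pattern[i]) exactly as in A.
def aHDiff (pattern : List String) (i : Nat) : Int :=
  aWhile (fun d diff =>
      (List.range ((pattern.getD i "").toList.length)).foldl (fun diff jj =>
        if (pattern.getD (i - d) "").toList.getD jj ' ' ≠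
            (pattern.getD (i + 1 + d) "").toList.getD jj ' ' then diff + 1 else diff)
        diff)
    pattern.length i pattern.length 0 0

def aFindV (pattern : List String) : Option Nat :=
  (List.range (specW pattern - 1)).find? (fun j => aVDiff pattern j == 1)

def aFindH (pattern : List String) : Option Nat :=
  (List.range (pattern.length - 1)).find? (fun i => aHDiff pattern i == 1)

def process (patterns : List (List String)) : Int :=
  patterns.foldl (fun summary pattern =>
    match aFindV pattern with
    | some line => summary + (line : Int) + 1
    -- none: Python raises TypeError on None+1 (outside Pre_); the port defaults the line to 0
    | none => summary + 100 * (((aFindH pattern).getD 0 : Int) + 1)) 0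

-- ===== PORT B =====
-- [a+b for row in pattern for a in range(w) for b in range(a+1, w) if row[a] != row[b]];
-- row[a] defaults to ' ' where Python raises IndexError (short rows, outside Pre_).
def bVDiags (pattern : List String) : List Nat :=
  pattern.flatMap (fun row =>
    (List.range ((pattern.headD "").toList.length)).flatMap (fun a =>
      ((List.range' (a + 1) ((pattern.headD "").toList.length - (a + 1))).filter
          (fun b => row.toList.getD a ' ' != row.toList.getD b ' ')).map (fun b => a + b)))

-- counts = {}; for s in diags: counts[s] = counts.get(s, 0) + 1
def bCounter (diags : List Nat) : PySem.Dict Nat Int :=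
  diags.foldl (fun d s => d.modify s 0 (· + 1)) PySem.Dict.empty

-- next((j for j in range(w-1) if counts.get(2*j+1, 0) == 1), None)
def bFindV (pattern : List String) : Option Nat :=
  (List.range ((pattern.headD "").toList.length - 1)).find?
    (fun j => (bCounter (bVDiags pattern)).getD (2 * j + 1) 0 == 1)

-- [p+q for p in range(n) for q in range(p+1, n) for x, y in zip(pattern[p], pattern[q]) if x != y]
def bHDiags (pattern : List String) : List Nat :=
  (List.range pattern.length).flatMap (fun p =>
    (List.range' (p + 1) (pattern.length - (p + 1))).flatMap (fun q =>
      (((pattern.getD p "").toList.zip (pattern.getD q "").toList).filter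
          (fun xy => xy.1 != xy.2)).map (fun _ => p + q)))

def bFindH (pattern : List String) : Option Nat :=
  (List.range (pattern.length - 1)).find?
    (fun i => (bCounter (bHDiags pattern)).getD (2 * i + 1) 0 == 1)

def process_alt (patterns : List (List String)) : Int :=
  patterns.foldl (fun total pattern =>
    match bFindV pattern with
    | some v => total + (v : Int) + 1
    -- none: Python raises StopIteration from next() (outside Pre_); the port defaults the line to 0
    | none => total + 100 * (((bFindH pattern).getD 0 : Int) + 1)) 0

-- ===== PRECONDITION & SPEC =====
-- spec-level quantities, independent of both ports (specW, the grid width, is shared above)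
-- number of rows whose characters at columns a and b differ
def specNeCol (pattern : List String) (a b : Nat) : Nat :=
  (pattern.map (fun row => if row.toList.getD a ' ' != row.toList.getD b ' ' then 1 else 0)).sum
-- number of positions at which rows p and q differ
def specNeRow (pattern : List String) (p q : Nat) : Nat :=
  (((pattern.getD p "").toList.zip (pattern.getD q "").toList).filter
    (fun xy => xy.1 != xy.2)).length
-- smudge count of the vertical line between columns j and j+1 / horizontal line between rows i, i+1
def specVDiff (pattern : List String) (j : Nat) : Nat :=
  ((List.range (min (j + 1) (specW pattern - 1 - j))).map
    (fun d => specNeCol pattern (j - d) (j + 1 + d))).sum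
def specHDiff (pattern : List String) (i : Nat) : Nat :=
  ((List.range (min (i + 1) (pattern.length - 1 - i))).map
    (fun d => specNeRow pattern (i - d) (i + 1 + d))).sum

-- Pre_ admits each pattern that is nonempty and either has a one-smudge vertical line with no row
-- shorter than row 0 (B reads every column pair of every row), or is fully rectangular with a
-- one-smudge horizontal line; it excludes patterns where A raises (IndexError on empty/short-row
-- grids, TypeError on None + 1 when no line exists), the ragged grids where A still returns but B
-- raises IndexError while reading column pairs, and — requiring rectangularity in the horizontal
-- case — some ragged grids on which A and B both return the same value; ragged grids are outside
-- the natural rectangular-grid domain of the task and are not claimed.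
def Pre_process (patterns : List (List String)) : Prop :=
  ∀ pattern ∈ patterns, pattern ≠ [] ∧
    (((∀ row ∈ pattern, specW pattern ≤ row.toList.length) ∧
      (∃ j ∈ List.range (specW pattern - 1), specVDiff pattern j = 1)) ∨
     ((∀ row ∈ pattern, row.toList.length = specW pattern) ∧
      (∃ i ∈ List.range (pattern.length - 1), specHDiff pattern i = 1)))
instance (patterns : List (List String)) : Decidable (Pre_process patterns) := by
  unfold Pre_process; infer_instance

def pvWitness_process : List (List String) := [["aa", "ab"]]

def Spec_process (patterns : List (List String)) (out : Int) : Prop := out = process_alt patterns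
instance (patterns : List (List String)) (out : Int) : Decidable (Spec_process patterns out) := by
  unfold Spec_process; infer_instance

-- ===== CLAIM (what is proved, stated in full; the proofs are below) =====
def Claim_equal_process : Prop := ∀ (patterns : List (List String)),
  Dom_process patterns → Pre_process patterns → Spec_process patterns (process patterns)

-- ===== LEMMAS AND PROOFS =====

-- find? only depends on the predicate's values on the list
lemma find?_congr_mem {α : Type} (l : List α) (p q : α → Bool)
    (h : ∀ x ∈ l, p x = q x) : l.find? p = l.find? q := by
  induction l with
  | nil => rfl
  | cons x xs ih =>
    simp only [List.find?_cons]
    rw [h x (by simp)]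
    cases q x
    · exact ih (fun y hy => h y (by simp [hy]))
    · rfl

-- the while loop as a sum of its per-iteration contributions over [d, stop)
lemma aWhile_eq_sum (step : Nat → Int → Int) (lim j : Nat) (f : Nat → Int)
    (hstep : ∀ d diff, d < min (j + 1) (lim - j - 1) → step d diff = diff + f d) :
    ∀ fuel d diff, min (j + 1) (lim - j - 1) - d ≤ fuel →
      aWhile step lim j fuel d diff =
        diff + ((List.range' d (min (j + 1) (lim - j - 1) - d)).map f).sum := by
  intro fuel
  induction fuel with
  | zero =>
    intro d diff h
    have h0 : min (j + 1) (lim - j - 1) - d = 0 := by omega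
    simp [aWhile, h0]
  | succ fuel ih =>
    intro d diff h
    by_cases hd : d < min (j + 1) (lim - j - 1)
    · have hcond : d ≤ j ∧ j + 1 + d < lim := by omega
      have hn : min (j + 1) (lim - j - 1) - d = (min (j + 1) (lim - j - 1) - (d + 1)) + 1 := by
        omega
      rw [aWhile, if_pos hcond, ih (d + 1) (step d diff) (by omega), hstep d diff hd, hn,
        List.range'_succ]
      simp [add_assoc]
    · have hcond : ¬(d ≤ j ∧ j + 1 + d < lim) := by omega
      have h0 : min (j + 1) (lim - j - 1) - d = 0 := by omega
      rw [aWhile, if_neg hcond, h0]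
      simp

lemma count_eq_sum (l : List Nat) (c : Nat) :
    l.count c = (l.map (fun x => if x = c then 1 else 0)).sum := by
  rw [List.count_eq_countP]
  exact Eq.symm (PySem.List.sum_map_ite_one_zero_nat' (fun x => x = c) l)

lemma sum_flatMap {α β : Type} (l : List α) (f : α → List β) (g : β → Nat) :
    ((l.flatMap f).map g).sum = (l.map (fun x => ((f x).map g).sum)).sum := by
  induction l with
  | nil => rfl
  | cons x xs ih => simp [List.flatMap_cons, ih]

lemma sum_map_filter {α : Type} (l : List α) (q : α → Bool) (g : α → Nat) :
    ((l.filter q).map g).sum = (l.map (fun x => if q x then g x else 0)).sum := by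
  induction l with
  | nil => rfl
  | cons x xs ih => by_cases h : q x <;> simp [h, ih]

lemma sum_range'_single (lo m c : Nat) (g : Nat → Nat) :
    ((List.range' lo m).map (fun b => if b = c then g b else 0)).sum =
      if lo ≤ c ∧ c < lo + m then g c else 0 := by
  induction m generalizing lo with
  | zero => rw [if_neg (by omega)]; rfl
  | succ m ih =>
    rw [List.range'_succ]
    simp only [List.map_cons, List.sum_cons, ih]
    by_cases h : lo = c
    · subst h
      rw [if_pos rfl, if_neg (by omega), if_pos (by omega)]
      exact Nat.add_zero _
    · rw [if_neg h]
      by_cases h2 : lo + 1 ≤ c ∧ c < lo + 1 + m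
      · rw [if_pos h2, if_pos (by omega)]
        exact Nat.zero_add _
      · rw [if_neg h2, if_neg (by omega)]

lemma sum_map_add {α : Type} (l : List α) (f g : α → Nat) :
    (l.map (fun x => f x + g x)).sum = (l.map f).sum + (l.map g).sum := by
  induction l with
  | nil => rfl
  | cons x xs ih => simp only [List.map_cons, List.sum_cons, ih]; omega

lemma sum_map_swap {α : Type} (l : List α) (r : List Nat) (g : α → Nat → Nat) :
    (l.map (fun x => (r.map (g x)).sum)).sum = (r.map (fun d => (l.map (fun x => g x d)).sum)).sum := by
  induction l with
  | nil => simp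
  | cons x xs ih =>
    simp only [List.map_cons, List.sum_cons, ih]
    rw [sum_map_add r (g x) (fun d => (xs.map (fun x => g x d)).sum)]

lemma list_sum_range (n : Nat) (f : Nat → Nat) : ((List.range n).map f).sum = ∑ i ∈ Finset.range n, f i := by
  simp [Finset.sum]; rfl

lemma bucket_eq_mirror (w j : Nat) (hj : j + 1 ≤ w) (g : Nat → Nat → Nat) :
    ((List.range w).map (fun a =>
        if a + 1 ≤ 2 * j + 1 - a ∧ 2 * j + 1 - a < w then g a (2 * j + 1 - a) else 0)).sum =
      ((List.range (min (j + 1) (w - 1 - j))).map (fun d => g (j - d) (j + 1 + d))).sum := by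
  rw [list_sum_range, list_sum_range]
  have hsub : Finset.range (j + 1) ⊆ Finset.range w := by
    intro x hx; simp only [Finset.mem_range] at *; omega
  rw [← Finset.sum_subset hsub
    (by intro a _ ha; rw [if_neg]; simp only [Finset.mem_range] at ha; omega)]
  rw [← Finset.sum_range_reflect]
  have hsub2 : Finset.range (min (j + 1) (w - 1 - j)) ⊆ Finset.range (j + 1) := by
    intro x hx; simp only [Finset.mem_range] at *; omega
  rw [← Finset.sum_subset hsub2
    (by intro d hd hd2; simp only [Finset.mem_range] at hd hd2; rw [if_neg]; omega)]
  apply Finset.sum_congr rfl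
  intro d hd
  simp only [Finset.mem_range] at hd
  rw [if_pos (by omega)]
  congr 1
  omega

lemma count_vdiags (pattern : List String) (j : Nat) (hj : j + 1 ≤ specW pattern) :
    (bVDiags pattern).count (2 * j + 1) = specVDiff pattern j := by
  rw [count_eq_sum, bVDiags, sum_flatMap]
  have hrow : ∀ row ∈ pattern,
      (((List.range ((pattern.headD "").toList.length)).flatMap (fun a =>
          ((List.range' (a + 1) ((pattern.headD "").toList.length - (a + 1))).filter
              (fun b => row.toList.getD a ' ' != row.toList.getD b ' ')).map (fun b => a + b))).map
        (fun x => if x = 2 * j + 1 then 1 else 0)).sum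
      = ((List.range (min (j + 1) (specW pattern - 1 - j))).map
          (fun d => if row.toList.getD (j - d) ' ' != row.toList.getD (j + 1 + d) ' '
            then 1 else 0)).sum := by
    intro row _
    rw [sum_flatMap]
    have ha : ∀ a ∈ List.range ((pattern.headD "").toList.length),
        ((((List.range' (a + 1) ((pattern.headD "").toList.length - (a + 1))).filter
              (fun b => row.toList.getD a ' ' != row.toList.getD b ' ')).map (fun b => a + b)).map
          (fun x => if x = 2 * j + 1 then 1 else 0)).sum
        = if a + 1 ≤ 2 * j + 1 - a ∧ 2 * j + 1 - a < specW pattern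
            then (if row.toList.getD a ' ' != row.toList.getD (2 * j + 1 - a) ' ' then 1 else 0)
            else 0 := by
      intro a hamem
      have hWa : (pattern.headD "").toList.length = specW pattern := rfl
      have haw : a < specW pattern := by simpa [specW] using hamem
      rw [List.map_map, sum_map_filter]
      have hpt : ∀ b ∈ List.range' (a + 1) ((pattern.headD "").toList.length - (a + 1)),
          (if (row.toList.getD a ' ' != row.toList.getD b ' ') = true
            then ((fun x => if x = 2 * j + 1 then 1 else 0) ∘ (fun b => a + b)) b else 0)
          = (if b = 2 * j + 1 - a
              then (if row.toList.getD a ' ' != row.toList.getD b ' ' then 1 else 0) else 0) := by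
        intro b hb
        have hb' := List.mem_range'_1.mp hb
        simp only [Function.comp]
        by_cases hc : b = 2 * j + 1 - a
        · have harith : a + b = 2 * j + 1 := by omega
          rw [if_pos harith, if_pos hc]
        · have harith : ¬(a + b = 2 * j + 1) := by omega
          rw [if_neg hc, if_neg harith]
          simp
      rw [List.map_congr_left hpt, sum_range'_single]
      have hfix : a + 1 + ((pattern.headD "").toList.length - (a + 1)) = specW pattern := by
        omega
      rw [hfix]
    rw [List.map_congr_left ha]
    exact bucket_eq_mirror (specW pattern) j hj
      (fun a b => if row.toList.getD a ' ' != row.toList.getD b ' ' then 1 else 0)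
  rw [List.map_congr_left hrow, sum_map_swap]
  rfl

lemma count_hdiags (pattern : List String) (i : Nat) (hi : i + 1 ≤ pattern.length) :
    (bHDiags pattern).count (2 * i + 1) = specHDiff pattern i := by
  rw [count_eq_sum, bHDiags, sum_flatMap]
  have hp : ∀ p ∈ List.range pattern.length,
      (((List.range' (p + 1) (pattern.length - (p + 1))).flatMap (fun q =>
          (((pattern.getD p "").toList.zip (pattern.getD q "").toList).filter
              (fun xy => xy.1 != xy.2)).map (fun _ => p + q))).map
        (fun x => if x = 2 * i + 1 then 1 else 0)).sum
      = if p + 1 ≤ 2 * i + 1 - p ∧ 2 * i + 1 - p < pattern.length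
          then specNeRow pattern p (2 * i + 1 - p) else 0 := by
    intro p hpmem
    have hpn : p < pattern.length := by simpa using hpmem
    rw [sum_flatMap]
    have hq : ∀ q ∈ List.range' (p + 1) (pattern.length - (p + 1)),
        (((((pattern.getD p "").toList.zip (pattern.getD q "").toList).filter
              (fun xy => xy.1 != xy.2)).map (fun _ => p + q)).map
          (fun x => if x = 2 * i + 1 then 1 else 0)).sum
        = if q = 2 * i + 1 - p then specNeRow pattern p q else 0 := by
      intro q hqmem
      have hq' := List.mem_range'_1.mp hqmem
      rw [List.map_map]
      by_cases hc : q = 2 * i + 1 - p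
      · have harith : p + q = 2 * i + 1 := by omega
        rw [if_pos hc]
        simp [Function.comp_def, harith, specNeRow]
      · have harith : ¬(p + q = 2 * i + 1) := by omega
        rw [if_neg hc]
        simp [Function.comp_def, harith]
    rw [List.map_congr_left hq, sum_range'_single]
    have hfix : p + 1 + (pattern.length - (p + 1)) = pattern.length := by omega
    rw [hfix]
  rw [List.map_congr_left hp]
  exact bucket_eq_mirror pattern.length i hi (fun p q => specNeRow pattern p q)

-- x.zip y as mirrored index reads, for two lists of the same length
lemma zip_eq_map_range (x y : List Char) (w : Nat) (hx : x.length = w) (hy : y.length = w) :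
    x.zip y = (List.range w).map (fun k => (x.getD k ' ', y.getD k ' ')) := by
  apply List.ext_getElem
  · simp [hx, hy]
  · intro k h1 h2
    have hk : k < w := by simp only [List.length_zip, hx, hy] at h1; omega
    simp only [List.getElem_zip, List.getElem_map, List.getElem_range]
    rw [List.getD_eq_getElem _ _ (by omega), List.getD_eq_getElem _ _ (by omega)]

-- A's vertical smudge count at line j is the spec smudge count
lemma aVDiff_eq_spec (pattern : List String) (j : Nat) :
    aVDiff pattern j = (specVDiff pattern j : Int) := by
  rw [aVDiff, aWhile_eq_sum _ (specW pattern) j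
      (fun d => (specNeCol pattern (j - d) (j + 1 + d) : Int))
      (by
        intro d diff _hd
        rw [PySem.List.foldl_ite_add_one]
        congr 1
        simp only [specNeCol, PySem.List.sum_map_ite_one_zero_nat']
        congr 1
        apply List.countP_congr
        intro row _
        simp)
      (specW pattern) 0 0 (by omega)]
  rw [Nat.sub_zero, zero_add, specVDiff, Nat.cast_list_sum, List.map_map]
  have h1 : min (j + 1) (specW pattern - 1 - j) = min (j + 1) (specW pattern - j - 1) := by
    omega
  rw [h1, List.range_eq_range']
  rfl

-- A's horizontal smudge count at line i is the spec smudge count (rectangular pattern)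
lemma aHDiff_eq_spec (pattern : List String) (i : Nat) (hin : i < pattern.length)
    (hrect : ∀ row ∈ pattern, row.toList.length = specW pattern) :
    aHDiff pattern i = (specHDiff pattern i : Int) := by
  have hlen : ∀ a : Nat, a < pattern.length →
      (pattern.getD a "").toList.length = specW pattern := by
    intro a ha
    rw [List.getD_eq_getElem _ _ ha]
    exact hrect _ (List.getElem_mem _)
  rw [aHDiff, aWhile_eq_sum _ pattern.length i
      (fun d => (specNeRow pattern (i - d) (i + 1 + d) : Int))
      (by
        intro d diff hd
        rw [hlen i hin, PySem.List.foldl_ite_add_one]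
        congr 1
        simp only [specNeRow]
        rw [← List.countP_eq_length_filter,
          zip_eq_map_range _ _ (specW pattern) (hlen (i - d) (by omega)) (hlen (i + 1 + d) (by omega)),
          List.countP_map]
        congr 1
        apply List.countP_congr
        intro jj _
        simp [Function.comp])
      pattern.length 0 0 (by omega)]
  rw [Nat.sub_zero, zero_add, specHDiff, Nat.cast_list_sum, List.map_map]
  have h1 : min (i + 1) (pattern.length - 1 - i) = min (i + 1) (pattern.length - i - 1) := by
    omega
  rw [h1, List.range_eq_range']
  rfl

-- the two vertical searches agree on every pattern
lemma findV_eq (pattern : List String) : aFindV pattern = bFindV pattern := by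
  rw [aFindV, bFindV]
  apply find?_congr_mem
  intro j hj
  have hjw : j + 1 ≤ specW pattern := by
    have : j < specW pattern - 1 := by simpa using hj
    omega
  rw [aVDiff_eq_spec]
  rw [show bCounter (bVDiags pattern) = PySem.Dict.counter (bVDiags pattern) from
    (PySem.Dict.counter_eq_foldl (bVDiags pattern)).symm]
  rw [PySem.Dict.getD_counter, count_vdiags pattern j hjw]

-- the two horizontal searches agree on rectangular patterns
lemma findH_eq (pattern : List String)
    (hrect : ∀ row ∈ pattern, row.toList.length = specW pattern) :
    aFindH pattern = bFindH pattern := by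
  rw [aFindH, bFindH]
  apply find?_congr_mem
  intro i hi
  have hin : i < pattern.length := by
    have : i < pattern.length - 1 := by simpa using hi
    omega
  rw [aHDiff_eq_spec pattern i hin hrect]
  rw [show bCounter (bHDiags pattern) = PySem.Dict.counter (bHDiags pattern) from
    (PySem.Dict.counter_eq_foldl (bHDiags pattern)).symm]
  rw [PySem.Dict.getD_counter, count_hdiags pattern i (by omega)]

-- ===== VERDICT (by name: the statement is the Claim_ definition above) =====
theorem process_spec : Claim_equal_process := by
  intro patterns _hdom hpre
  show process patterns = process_alt patterns
  unfold process process_alt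
  apply PySem.List.foldl_congr_mem
  intro acc pattern hmem
  obtain ⟨-, hbr⟩ := hpre pattern hmem
  rcases hbr with ⟨-, j, hj, hs⟩ | ⟨hrect, -⟩
  · -- a vertical line exists, so neither side reaches the horizontal search
    have hfound : ∃ x ∈ List.range (specW pattern - 1),
        (aVDiff pattern x == 1) = true := by
      refine ⟨j, hj, ?_⟩
      rw [aVDiff_eq_spec, hs]
      simp
    have hsome : (aFindV pattern).isSome := List.find?_isSome.mpr hfound
    obtain ⟨v, hv⟩ := Option.isSome_iff_exists.mp hsome
    rw [findV_eq pattern] at hv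
    rw [findV_eq pattern, hv]
  · rw [findV_eq pattern, findH_eq pattern hrect]
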